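-- pv_equiv track=rewrite | github.com/Mesi12/um_2021_text_mining | w_questions/ner/stanford.py | rechunk
-- ===== SOURCE A (Python) =====
-- def rechunk(ner_output):
--     chunked, pos = [], ""
--     prev_tag = 0
--     for i, word_pos in enumerate(ner_output):
--         word, pos = word_pos
--         if pos in ['PERSON', 'ORGANIZATION', 'LOCATION'] and pos == prev_tag:
--             chunked[-1]+=word_pos
--         else:
--             chunked.append(word_pos)
--         prev_tag = pos
--
--
--     clean_chunked = [tuple([" ".join(wordpos[::2]), wordpos[-1]])
--                     if len(wordpos)!=2 else wordpos for wordpos in chunked]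
--
--     return clean_chunked
-- ===== SOURCE B (Python) =====
-- _ENT = ('PERSON', 'ORGANIZATION', 'LOCATION')
--
-- def rechunk(ner_output):
--     out = []
--     i, n = 0, len(ner_output)
--     while i < n:
--         tag = ner_output[i][1]
--         j = i + 1
--         if tag in _ENT:
--             while j < n and ner_output[j][1] == tag:
--                 j += 1
--         if j == i + 1:
--             out.append(ner_output[i])
--         else:
--             out.append((" ".join(w for w, _ in ner_output[i:j]), tag))
--         i = j
--     return out
-- ===== Notes on version B (the rewrite author's own statement) =====
-- stated objective: alternative
-- what changed: Replaces A's merge-into-growing-flat-tuples pass plus [::2]-cleaning pass with a two-pointer scan whose inner pointer extends each entity run and which emits the final formatted element directly, keeping no intermediate chunk structure.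
import Mathlib
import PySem

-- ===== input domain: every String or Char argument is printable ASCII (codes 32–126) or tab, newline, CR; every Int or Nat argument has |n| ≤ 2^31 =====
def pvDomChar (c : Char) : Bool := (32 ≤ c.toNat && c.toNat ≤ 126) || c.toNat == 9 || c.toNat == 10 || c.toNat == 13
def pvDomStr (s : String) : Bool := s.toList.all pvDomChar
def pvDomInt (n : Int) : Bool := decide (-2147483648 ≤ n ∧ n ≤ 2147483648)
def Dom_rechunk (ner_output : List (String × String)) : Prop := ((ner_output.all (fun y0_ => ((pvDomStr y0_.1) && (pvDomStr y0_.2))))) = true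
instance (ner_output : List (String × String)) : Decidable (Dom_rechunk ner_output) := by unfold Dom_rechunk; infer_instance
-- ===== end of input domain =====

-- B replaces A's merge-into-flat-tuples pass plus [::2]-cleaning pass with a
-- two-pointer scan that extends each entity run in place and emits the final
-- formatted element directly (alternative decomposition, no intermediate chunks).


-- ===== PORT A =====
-- A's chunks are variable-length flat tuples (w1,p1,w2,p2,…): ported as List String.
-- prev_tag starts as the int 0, which Python never equates with a string: ported as Option String = none.
def rechunkLoop (chunked : List (List String)) (prev_tag : Option String) :
    List (String × String) → List (List String)
  | [] => chunked
  | wp :: rest =>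
    let chunked' :=
      if (wp.2 = "PERSON" ∨ wp.2 = "ORGANIZATION" ∨ wp.2 = "LOCATION") ∧ some wp.2 = prev_tag
      then chunked.dropLast ++ [chunked.getLastD [] ++ [wp.1, wp.2]]  -- chunked[-1] += word_pos
      else chunked ++ [[wp.1, wp.2]]
    rechunkLoop chunked' (some wp.2) rest

-- tuple([" ".join(wordpos[::2]), wordpos[-1]]) if len(wordpos)!=2 else wordpos
def cleanA (wordpos : List String) : String × String :=
  if wordpos.length ≠ 2 then
    (PySem.Str.join " " ((PySem.List.slice? wordpos none none 2).getD []), wordpos.getLastD "")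
  else
    (wordpos.headD "", wordpos.getLastD "")

def rechunk (ner_output : List (String × String)) : List (String × String) :=
  (rechunkLoop [] none ner_output).map cleanA

-- ===== PORT B =====
def isEntity (tag : String) : Bool :=
  tag = "PERSON" || tag = "ORGANIZATION" || tag = "LOCATION"

-- the inner while loop 'while j < n and ner_output[j][1] == tag: j += 1':
-- splits off the maximal prefix whose tag equals t
def spanTag (t : String) : List (String × String) → List (String × String) × List (String × String)
  | [] => ([], [])
  | wp :: rest =>
    if wp.2 = t then
      let p := spanTag t rest
      (wp :: p.1, p.2)
    else ([], wp :: rest)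

theorem spanTag_snd_length (t : String) :
    ∀ l : List (String × String), (spanTag t l).2.length ≤ l.length := by
  intro l
  induction l with
  | nil => simp [spanTag]
  | cons wp rest ih =>
    by_cases h : wp.2 = t
    · simp [spanTag, h]; omega
    · simp [spanTag, h]

-- the outer while loop, as recursion on the remaining suffix (i = j)
def rechunk_alt (ner_output : List (String × String)) : List (String × String) :=
  match ner_output with
  | [] => []
  | wp :: rest =>
    if isEntity wp.2 then
      let p := spanTag wp.2 rest
      if p.1.isEmpty then wp :: rechunk_alt p.2       -- j == i + 1: original element
      else (PySem.Str.join " " (wp.1 :: p.1.map Prod.fst), wp.2) :: rechunk_alt p.2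
    else wp :: rechunk_alt rest
termination_by ner_output.length
decreasing_by
  · have := spanTag_snd_length wp.2 rest; simp; omega
  · have := spanTag_snd_length wp.2 rest; simp; omega
  · simp

-- ===== PRECONDITION & SPEC =====
def Spec_rechunk (ner_output : List (String × String)) (out : List (String × String)) : Prop := out = rechunk_alt ner_output
instance (ner_output : List (String × String)) (out : List (String × String)) : Decidable (Spec_rechunk ner_output out) := by unfold Spec_rechunk; infer_instance

-- ===== CLAIM (what is proved, stated in full; the proofs are below) =====
def Claim_equal_rechunk : Prop := ∀ (ner_output : List (String × String)), Dom_rechunk ner_output → Spec_rechunk ner_output (rechunk ner_output)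

-- ===== LEMMAS AND PROOFS =====

-- proof-only intermediate: the grouping of the input into runs of pairs
def groupRuns (runs : List (List (String × String))) :
    List (String × String) → List (List (String × String))
  | [] => runs
  | wp :: rest =>
    let runs' :=
      if !runs.isEmpty && isEntity wp.2
          && (((runs.getLastD []).getLast?).map Prod.snd == some wp.2)
      then runs.dropLast ++ [runs.getLastD [] ++ [wp]]
      else runs ++ [[wp]]
    groupRuns runs' rest

def fmtRun (run : List (String × String)) : String × String :=
  match run with
  | [x] => x
  | _ => (PySem.Str.join " " (run.map Prod.fst), (run.getLastD ("", "")).2)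

-- a run of pairs, flattened the way A's chunks store it
def flatRun (run : List (String × String)) : List String :=
  run.flatMap (fun wp => [wp.1, wp.2])

-- the value of A's prev_tag after processing, read off the runs
def lastTag (runs : List (List (String × String))) : Option String :=
  ((runs.getLastD []).getLast?).map Prod.snd

theorem loop_eq (l : List (String × String)) :
    ∀ runs, rechunkLoop (runs.map flatRun) (lastTag runs) l
      = (groupRuns runs l).map flatRun := by
  induction l with
  | nil => intro runs; simp [rechunkLoop, groupRuns]
  | cons wp rest ih =>
    intro runs
    rw [rechunkLoop, groupRuns]
    by_cases hc : (!runs.isEmpty && isEntity wp.2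
        && (((runs.getLastD []).getLast?).map Prod.snd == some wp.2)) = true
    · -- merged into the last chunk / run
      simp only [Bool.and_eq_true, Bool.not_eq_true', List.isEmpty_eq_false_iff,
        beq_iff_eq, isEntity, Bool.or_eq_true, decide_eq_true_eq] at hc
      obtain ⟨⟨hne, hent⟩, htag⟩ := hc
      rw [if_pos ⟨by tauto, by rw [lastTag, htag]⟩,
        if_pos (by
          simp only [Bool.and_eq_true, Bool.not_eq_true', List.isEmpty_eq_false_iff,
            beq_iff_eq, isEntity, Bool.or_eq_true, decide_eq_true_eq]
          exact ⟨⟨hne, hent⟩, htag⟩)]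
      have hlastflat : (runs.map flatRun).getLastD [] = flatRun (runs.getLastD []) := by
        rcases List.exists_cons_of_ne_nil hne with ⟨a, t, rfl⟩
        simp [List.getLastD_eq_getLast?, List.getLast?_cons]
      have hdrop : (runs.map flatRun).dropLast = runs.dropLast.map flatRun := by
        simp [List.map_dropLast]
      rw [hlastflat, hdrop]
      have heq : runs.dropLast.map flatRun ++ [flatRun (runs.getLastD []) ++ [wp.1, wp.2]]
          = ((runs.dropLast ++ [runs.getLastD [] ++ [wp]]).map flatRun) := by
        simp [flatRun]
      rw [heq]
      have hTag' : some wp.2 = lastTag (runs.dropLast ++ [runs.getLastD [] ++ [wp]]) := by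
        simp [lastTag]
      rw [hTag']; exact ih _
    · -- a new chunk / run is started
      rw [if_neg hc, if_neg (by
        intro hA
        apply hc
        have hne : runs ≠ [] := by
          intro hr; rw [hr] at hA; simp [lastTag] at hA
        simp only [Bool.and_eq_true, Bool.not_eq_true', List.isEmpty_eq_false_iff,
          beq_iff_eq, isEntity, Bool.or_eq_true, decide_eq_true_eq]
        exact ⟨⟨hne, by tauto⟩, hA.2.symm⟩)]
      have heq : runs.map flatRun ++ [[wp.1, wp.2]]
          = ((runs ++ [[wp]]).map flatRun) := by simp [flatRun]
      rw [heq]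
      have hTag' : some wp.2 = lastTag (runs ++ [[wp]]) := by simp [lastTag]
      rw [hTag']; exact ih _

theorem length_flatRun (run : List (String × String)) :
    (flatRun run).length = 2 * run.length := by
  induction run with
  | nil => rfl
  | cons wp rest ih => simp [flatRun] at ih ⊢; omega

theorem slice?_two {α : Type} (xs : List α) :
    PySem.List.slice? xs none none 2
      = some ((List.range ((xs.length + 1) / 2)).filterMap (fun k => xs[2 * k]?)) := by
  simp only [PySem.List.slice?, PySem.List.sliceIndices]
  norm_num
  have h1 : (if 0 < xs.length then (((xs.length : Int) + 2 - 1) / 2).toNat else 0)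
      = (xs.length + 1) / 2 := by
    split_ifs with h
    · omega
    · omega
  rw [h1]
  apply List.filterMap_congr
  intro k _
  congr 1

theorem range_filterMap_getElem? {α : Type} (l : List α) :
    (List.range l.length).filterMap (fun k => l[k]?) = l := by
  induction l with
  | nil => simp
  | cons x xs ih =>
    rw [List.length_cons, List.range_succ_eq_map, List.filterMap_cons,
      List.filterMap_map]
    simp only [List.getElem?_cons_zero]
    simpa [Function.comp] using ih

theorem flatRun_get (run : List (String × String)) (k : Nat) :
    (flatRun run)[2 * k]? = (run[k]?).map Prod.fst := by
  induction run generalizing k with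
  | nil => simp [flatRun]
  | cons wp rest ih =>
    cases k with
    | zero => simp [flatRun]
    | succ j =>
      have h2 : 2 * (j + 1) = (2 * j) + 1 + 1 := by omega
      simp only [flatRun, List.flatMap_cons] at ih ⊢
      rw [h2]
      simpa using ih j

theorem slice2_flatRun (run : List (String × String)) :
    (PySem.List.slice? (flatRun run) none none 2).getD [] = run.map Prod.fst := by
  rw [slice?_two, Option.getD_some]
  have hc : ((flatRun run).length + 1) / 2 = (run.map Prod.fst).length := by
    rw [length_flatRun]; simp; omega
  rw [hc]
  have : ∀ k, (flatRun run)[2 * k]? = (run.map Prod.fst)[k]? := by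
    intro k; rw [flatRun_get, List.getElem?_map]
  calc (List.range (run.map Prod.fst).length).filterMap (fun k => (flatRun run)[2 * k]?)
      = (List.range (run.map Prod.fst).length).filterMap
          (fun k => (run.map Prod.fst)[k]?) := by
        exact List.filterMap_congr (fun k _ => this k)
    _ = run.map Prod.fst := range_filterMap_getElem? _

theorem getLast_flatRun (run : List (String × String)) (h : run ≠ []) :
    (flatRun run).getLastD "" = (run.getLastD ("", "")).2 := by
  induction run with
  | nil => simp at h
  | cons wp rest ih =>
    cases rest with
    | nil => simp [flatRun]
    | cons y ys =>
      have := ih (by simp)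
      simpa [flatRun, List.getLastD_eq_getLast?, List.getLast?_append] using this

theorem cleanA_flatRun (run : List (String × String)) (h : run ≠ []) :
    cleanA (flatRun run) = fmtRun run := by
  match run, h with
  | [x], _ =>
    simp [cleanA, flatRun, fmtRun]
  | x :: y :: ys, _ =>
    have hlen : (flatRun (x :: y :: ys)).length ≠ 2 := by
      rw [length_flatRun]; simp only [List.length_cons]; omega
    rw [cleanA, if_pos hlen, slice2_flatRun, getLast_flatRun _ (by simp)]
    rfl

theorem groupRuns_ne_nil_mem (l : List (String × String)) :
    ∀ runs, (∀ r ∈ runs, r ≠ []) → ∀ r ∈ groupRuns runs l, r ≠ [] := by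
  induction l with
  | nil => intro runs h; simpa [groupRuns] using h
  | cons wp rest ih =>
    intro runs h
    rw [groupRuns]
    by_cases hc : (!runs.isEmpty && isEntity wp.2
        && (((runs.getLastD []).getLast?).map Prod.snd == some wp.2)) = true
    · rw [if_pos hc]
      refine ih _ ?_
      intro r hr
      rcases List.mem_append.mp hr with h1 | h2
      · exact h r (List.dropLast_subset _ h1)
      · simp at h2; subst h2; simp
    · rw [if_neg hc]
      refine ih _ ?_
      intro r hr
      rcases List.mem_append.mp hr with h1 | h2
      · exact h r h1
      · simp at h2; subst h2; simp

-- groupRuns never touches runs placed before the (nonempty) tail of its accumulator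
theorem groupRuns_prefix (l : List (String × String)) :
    ∀ (runs0 rs : List (List (String × String))), rs ≠ [] →
      groupRuns (runs0 ++ rs) l = runs0 ++ groupRuns rs l := by
  induction l with
  | nil => intro runs0 rs _; simp [groupRuns]
  | cons wp rest ih =>
    intro runs0 rs hne
    rw [groupRuns, groupRuns]
    have hEmpty : ((runs0 ++ rs).isEmpty) = rs.isEmpty := by
      have h1 : (runs0 ++ rs).isEmpty = false := by simp [hne]
      have h2 : rs.isEmpty = false := by simp [hne]
      rw [h1, h2]
    have hLast : (runs0 ++ rs).getLastD [] = rs.getLastD [] := by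
      cases hopt : rs.getLast? with
      | none => exact absurd (List.getLast?_eq_none_iff.mp hopt) hne
      | some x => simp [List.getLastD_eq_getLast?, List.getLast?_append, hopt]
    rw [hEmpty, hLast]
    by_cases hc : (!rs.isEmpty && isEntity wp.2
        && (((rs.getLastD []).getLast?).map Prod.snd == some wp.2)) = true
    · rw [if_pos hc, if_pos hc]
      have hdrop : (runs0 ++ rs).dropLast = runs0 ++ rs.dropLast := by
        rcases List.exists_cons_of_ne_nil hne with ⟨a, t, rfl⟩
        rw [List.dropLast_append_cons]
      rw [hdrop, List.append_assoc]
      exact ih runs0 _ (by simp)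
    · rw [if_neg hc, if_neg hc, List.append_assoc]
      exact ih runs0 _ (by simp [hne])

-- an entity run absorbs exactly its spanTag prefix
theorem groupRuns_entity (t : String) (hent : isEntity t = true) (l : List (String × String)) :
    ∀ run : List (String × String), run ≠ [] → (run.getLast?).map Prod.snd = some t →
      groupRuns [run] l = (run ++ (spanTag t l).1) :: groupRuns [] (spanTag t l).2 := by
  induction l with
  | nil => intro run hne _; simp [groupRuns, spanTag]
  | cons wp rest ih =>
    intro run hne hlast
    by_cases h : wp.2 = t
    · rw [groupRuns]
      rw [if_pos (by
        simp only [Bool.and_eq_true, Bool.not_eq_true', List.isEmpty_eq_false_iff, beq_iff_eq]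
        refine ⟨⟨by simp, by rw [h]; exact hent⟩, ?_⟩
        simpa [List.getLastD_eq_getLast?, h] using hlast)]
      simp only [List.getLastD_eq_getLast?, List.dropLast_singleton, List.nil_append]
      have : (Option.getD [run].getLast? []) = run := by simp
      rw [this]
      have := ih (run ++ [wp]) (by simp) (by simp [h])
      rw [this]
      simp [spanTag, h]
    · rw [groupRuns]
      rw [if_neg (by
        simp only [Bool.and_eq_true, beq_iff_eq, List.getLastD_eq_getLast?,
          List.getLast?_singleton, Option.getD_some]
        rintro ⟨⟨-, -⟩, hEq⟩
        rw [hlast] at hEq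
        exact h (Option.some.inj hEq).symm)]
      have hspan : spanTag t (wp :: rest) = ([], wp :: rest) := by simp [spanTag, h]
      rw [hspan]
      simp only [List.append_nil]
      rw [show ([run] ++ [[wp]] : List (List (String × String))) = [run] ++ [[wp]] from rfl]
      rw [groupRuns_prefix rest [run] [[wp]] (by simp)]
      have : groupRuns [] (wp :: rest) = groupRuns [[wp]] rest := by
        rw [groupRuns]; simp
      rw [this]
      rfl

-- a non-entity token always stands alone
theorem groupRuns_nonentity (l : List (String × String)) :
    ∀ run : List (String × String), run ≠ [] →
      (∀ t, (run.getLast?).map Prod.snd = some t → isEntity t = false) →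
      groupRuns [run] l = run :: groupRuns [] l := by
  induction l with
  | nil => intro run hne _; simp [groupRuns]
  | cons wp rest ih =>
    intro run hne hno
    rw [groupRuns]
    rw [if_neg (by
      simp only [Bool.and_eq_true, Bool.not_eq_true', List.isEmpty_eq_false_iff, beq_iff_eq]
      rintro ⟨⟨-, hentwp⟩, hEq⟩
      have : isEntity wp.2 = false := by
        apply hno
        simpa [List.getLastD_eq_getLast?] using hEq
      rw [this] at hentwp; exact Bool.false_ne_true hentwp)]
    rw [groupRuns_prefix rest [run] [[wp]] (by simp)]
    have : groupRuns [] (wp :: rest) = groupRuns [[wp]] rest := by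
      rw [groupRuns]; simp
    rw [this]
    rfl

theorem spanTag_fst_tags (t : String) (l : List (String × String)) :
    ∀ x ∈ (spanTag t l).1, x.2 = t := by
  induction l with
  | nil => simp [spanTag]
  | cons wp rest ih =>
    by_cases h : wp.2 = t
    · simp only [spanTag, if_pos h]
      intro x hx
      rcases List.mem_cons.mp hx with rfl | hx'
      · exact h
      · exact ih x hx'
    · simp [spanTag, h]

theorem groupRuns_eq_alt (n : Nat) :
    ∀ l : List (String × String), l.length ≤ n →
      (groupRuns [] l).map fmtRun = rechunk_alt l := by
  induction n with
  | zero =>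
    intro l hl
    have : l = [] := List.length_eq_zero_iff.mp (Nat.le_zero.mp hl)
    subst this; simp [groupRuns, rechunk_alt]
  | succ m ih =>
    intro l hl
    cases l with
    | nil => simp [groupRuns, rechunk_alt]
    | cons wp rest =>
      have hstep : groupRuns [] (wp :: rest) = groupRuns [[wp]] rest := by
        rw [groupRuns]; simp
      rw [hstep, rechunk_alt]
      by_cases hent : isEntity wp.2 = true
      · rw [if_pos hent]
        rw [groupRuns_entity wp.2 hent rest [wp] (by simp) (by simp)]
        set p := spanTag wp.2 rest with hp
        rw [List.map_cons]
        have hrest : (groupRuns [] p.2).map fmtRun = rechunk_alt p.2 := by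
          apply ih
          have := spanTag_snd_length wp.2 rest
          simp only [← hp] at this
          simp only [List.length_cons] at hl
          omega
        rw [hrest]
        by_cases hpe : p.1.isEmpty
        · have h1 : p.1 = [] := List.isEmpty_iff.mp hpe
          rw [if_pos hpe]
          rw [h1]
          simp [fmtRun]
        · rw [if_neg hpe]
          have h1 : p.1 ≠ [] := by simpa [List.isEmpty_iff] using hpe
          congr 1
          rcases List.exists_cons_of_ne_nil h1 with ⟨a, as, ha⟩
          have hlastTag : ((wp :: p.1).getLastD ("", "")).2 = wp.2 := by
            have hmem : (wp :: p.1).getLast (by simp) ∈ wp :: p.1 := List.getLast_mem _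
            have hsome : (wp :: p.1).getLast? = some ((wp :: p.1).getLast (by simp)) :=
              List.getLast?_eq_some_getLast (by simp)
            rcases List.mem_cons.mp hmem with hm | hm
            · rw [List.getLastD_eq_getLast?, hsome]; simp [hm]
            · rw [List.getLastD_eq_getLast?, hsome]
              simp [spanTag_fst_tags wp.2 rest _ hm]
          rw [show ([wp] ++ p.1 : List (String × String)) = wp :: p.1 from rfl]
          have hfmt : fmtRun (wp :: p.1)
              = (PySem.Str.join " " ((wp :: p.1).map Prod.fst),
                 ((wp :: p.1).getLastD ("", "")).2) := by
            rw [ha]; rfl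
          rw [hfmt, hlastTag, List.map_cons]
      · rw [if_neg hent]
        rw [groupRuns_nonentity rest [wp] (by simp) (by
          intro t ht
          simp at ht
          rw [← ht]
          exact Bool.not_eq_true _ |>.mp hent)]
        rw [List.map_cons, ih rest (by simpa using Nat.le_of_succ_le_succ hl)]
        simp [fmtRun]

-- ===== VERDICT (by name: the statement is the Claim_ definition above) =====
theorem rechunk_spec : Claim_equal_rechunk := by
  intro ner _
  unfold Spec_rechunk rechunk
  have h0 : rechunkLoop [] none ner = (groupRuns [] ner).map flatRun := by
    simpa [lastTag] using loop_eq ner []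
  rw [h0, List.map_map]
  have h1 : ∀ run ∈ groupRuns [] ner, cleanA (flatRun run) = fmtRun run := by
    intro run hr
    exact cleanA_flatRun run (groupRuns_ne_nil_mem ner [] (by simp) run hr)
  calc (groupRuns [] ner).map (cleanA ∘ flatRun)
      = (groupRuns [] ner).map fmtRun := List.map_congr_left h1
    _ = rechunk_alt ner := groupRuns_eq_alt ner.length ner le_rfl
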